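-- pv_equiv track=rewrite | github.com/wilmurillo-ai/Design-Assistant | .skills/openclaw-skills/skills/brettburbidge/taskline/scripts/create_task_enhanced.py | parse_priority
-- ===== SOURCE A (Python) =====
-- from typing import Dict, List, Optional, Tuple
--
-- def parse_priority(text: str) -> Optional[str]:
--     """Extract priority from natural language."""
--     text = text.lower()
--     if any(word in text for word in ['urgent', 'critical', 'asap', 'emergency']):
--         return 'urgent'
--     elif any(word in text for word in ['high', 'important']):
--         return 'high'
--     elif any(word in text for word in ['medium', 'normal']):
--         return 'medium'
--     elif any(word in text for word in ['low']):
--         return 'low'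
--     return None
-- ===== SOURCE B (Python) =====
-- def parse_priority(text):
--     """Extract priority from natural language: one flat keyword->rank table, min rank wins."""
--     table = {'urgent': 0, 'critical': 0, 'asap': 0, 'emergency': 0,
--              'high': 1, 'important': 1,
--              'medium': 2, 'normal': 2,
--              'low': 3}
--     names = ['urgent', 'high', 'medium', 'low']
--     t = text.lower()
--     ranks = [r for w, r in table.items() if w in t]
--     return names[min(ranks)] if ranks else None
-- ===== Notes on version B (the rewrite author's own statement) =====
-- stated objective: simpler
-- what changed: Replaces four ordered early-return any() branches by a single flat keyword-to-rank table scanned once, returning the name of the minimum matched rank; tier order equals rank order so the result is identical.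
import Mathlib
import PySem

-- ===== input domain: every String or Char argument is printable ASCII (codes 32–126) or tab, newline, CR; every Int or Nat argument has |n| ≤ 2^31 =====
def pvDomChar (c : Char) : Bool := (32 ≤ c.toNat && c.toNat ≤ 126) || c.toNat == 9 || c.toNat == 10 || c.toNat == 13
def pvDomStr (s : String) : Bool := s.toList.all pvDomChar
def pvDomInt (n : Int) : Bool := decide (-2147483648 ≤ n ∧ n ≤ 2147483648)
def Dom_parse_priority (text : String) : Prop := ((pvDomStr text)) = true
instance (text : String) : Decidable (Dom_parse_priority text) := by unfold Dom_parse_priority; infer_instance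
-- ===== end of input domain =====

-- B replaces A's four ordered early-return branches by one flat keyword->rank table with min-rank selection (objective: simpler).
-- ===== PORT A =====
def parse_priority (text : String) : Option String :=
  let t := PySem.Str.lower text
  if (["urgent", "critical", "asap", "emergency"].any (fun w => PySem.Str.isIn w t)) then some "urgent"
  else if (["high", "important"].any (fun w => PySem.Str.isIn w t)) then some "high"
  else if (["medium", "normal"].any (fun w => PySem.Str.isIn w t)) then some "medium"
  else if (["low"].any (fun w => PySem.Str.isIn w t)) then some "low"
  else none

-- ===== PORT B =====
def pvTable : List (String × Int) :=
  [("urgent", 0), ("critical", 0), ("asap", 0), ("emergency", 0),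
   ("high", 1), ("important", 1), ("medium", 2), ("normal", 2), ("low", 3)]

def pvNames : List String := ["urgent", "high", "medium", "low"]

-- names[min(ranks)] is PySem.List.pyGet? (exact: every rank in the table lies in 0..3, so no IndexError arises)
def parse_priority_alt (text : String) : Option String :=
  let t := PySem.Str.lower text
  let ranks := (pvTable.filter (fun p => PySem.Str.isIn p.1 t)).map Prod.snd
  match ranks.min? with
  | some r => PySem.List.pyGet? pvNames r
  | none => none

-- ===== PRECONDITION & SPEC =====
def Spec_parse_priority (text : String) (out : Option String) : Prop := out = parse_priority_alt text
instance (text : String) (out : Option String) : Decidable (Spec_parse_priority text out) := by unfold Spec_parse_priority; infer_instance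

-- ===== CLAIM (what is proved, stated in full; the proofs are below) =====
def Claim_equal_parse_priority : Prop := ∀ (text : String), Dom_parse_priority text → Spec_parse_priority text (parse_priority text)

-- ===== LEMMAS AND PROOFS =====
-- ===== VERDICT (by name: the statement is the Claim_ definition above) =====
set_option maxHeartbeats 4000000 in
theorem parse_priority_spec : Claim_equal_parse_priority := by
  intro text _
  show parse_priority text = parse_priority_alt text
  unfold parse_priority parse_priority_alt pvTable pvNames
  simp only [List.any_cons, List.any_nil, List.filter_cons, List.filter_nil, List.map_cons, List.map_nil]
  generalize PySem.Str.lower text = t0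
  rcases Bool.eq_false_or_eq_true (PySem.Str.isIn "urgent" t0) with h1 | h1 <;> simp only [h1, Bool.false_eq_true, eq_self_iff_true, if_true, if_false, Bool.false_or, Bool.or_false, Bool.true_or, Bool.or_true] <;>
  rcases Bool.eq_false_or_eq_true (PySem.Str.isIn "critical" t0) with h2 | h2 <;> simp only [h2, Bool.false_eq_true, eq_self_iff_true, if_true, if_false, Bool.false_or, Bool.or_false, Bool.true_or, Bool.or_true] <;>
  rcases Bool.eq_false_or_eq_true (PySem.Str.isIn "asap" t0) with h3 | h3 <;> simp only [h3, Bool.false_eq_true, eq_self_iff_true, if_true, if_false, Bool.false_or, Bool.or_false, Bool.true_or, Bool.or_true] <;>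
  rcases Bool.eq_false_or_eq_true (PySem.Str.isIn "emergency" t0) with h4 | h4 <;> simp only [h4, Bool.false_eq_true, eq_self_iff_true, if_true, if_false, Bool.false_or, Bool.or_false, Bool.true_or, Bool.or_true] <;>
  rcases Bool.eq_false_or_eq_true (PySem.Str.isIn "high" t0) with h5 | h5 <;> simp only [h5, Bool.false_eq_true, eq_self_iff_true, if_true, if_false, Bool.false_or, Bool.or_false, Bool.true_or, Bool.or_true] <;>
  rcases Bool.eq_false_or_eq_true (PySem.Str.isIn "important" t0) with h6 | h6 <;> simp only [h6, Bool.false_eq_true, eq_self_iff_true, if_true, if_false, Bool.false_or, Bool.or_false, Bool.true_or, Bool.or_true] <;>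
  rcases Bool.eq_false_or_eq_true (PySem.Str.isIn "medium" t0) with h7 | h7 <;> simp only [h7, Bool.false_eq_true, eq_self_iff_true, if_true, if_false, Bool.false_or, Bool.or_false, Bool.true_or, Bool.or_true] <;>
  rcases Bool.eq_false_or_eq_true (PySem.Str.isIn "normal" t0) with h8 | h8 <;> simp only [h8, Bool.false_eq_true, eq_self_iff_true, if_true, if_false, Bool.false_or, Bool.or_false, Bool.true_or, Bool.or_true] <;>
  rcases Bool.eq_false_or_eq_true (PySem.Str.isIn "low" t0) with h9 | h9 <;> simp only [h9, Bool.false_eq_true, eq_self_iff_true, if_true, if_false, Bool.false_or, Bool.or_false, Bool.true_or, Bool.or_true] <;>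
  decide
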